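-- pv_equiv track=rewrite | github.com/ydb-platform/ydb | ydb/tests/functional/sqs/test_acl.py | __generate_expected_simplified_permissions_response
-- ===== SOURCE A (Python) =====
-- def __generate_expected_simplified_permissions_response(sid=None, permission_names=[]):
--     resp = 'AccountPermissions {'
--     if not permission_names:
--         resp += '}'
--     else:
--         resp += 'Permissions {{ Subject: \"{}\"'.format(sid)
--         for permission_name in permission_names:
--             resp += 'PermissionNames: \"{}\"'.format(permission_name)
--         resp += '}} EffectivePermissions {{ Subject: \"{}\"'.format(sid)
--         for permission_name in permission_names:
--             resp += 'PermissionNames: \"{}\"'.format(permission_name)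
--         resp += '}}'
--
--     return resp
-- ===== SOURCE B (Python) =====
-- def __generate_expected_simplified_permissions_response(sid=None, permission_names=[]):
--     # Grammar-driven rendering: the response is 'AccountPermissions {' ... '}'
--     # wrapping a space-joined list of sections; with no permission names the
--     # section list is empty and the join degenerates to '', so the empty case
--     # falls out of the same code path with no special branch.
--     sections = ['Permissions', 'EffectivePermissions'] if permission_names else []
--
--     def render(header):
--         body = ''.join('PermissionNames: "%s"' % n for n in permission_names)
--         return '%s { Subject: "%s"%s}' % (header, sid, body)
--
--     return 'AccountPermissions {' + ' '.join(render(h) for h in sections) + '}'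
-- ===== Notes on version B (the rewrite author's own statement) =====
-- stated objective: simpler
-- what changed: B treats the response as an outer wrapper around a space-joined list of rendered sections (empty list of sections when there are no permission names), so A's empty-list branch and its two appending loops disappear into one generic render-and-join.
import Mathlib
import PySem

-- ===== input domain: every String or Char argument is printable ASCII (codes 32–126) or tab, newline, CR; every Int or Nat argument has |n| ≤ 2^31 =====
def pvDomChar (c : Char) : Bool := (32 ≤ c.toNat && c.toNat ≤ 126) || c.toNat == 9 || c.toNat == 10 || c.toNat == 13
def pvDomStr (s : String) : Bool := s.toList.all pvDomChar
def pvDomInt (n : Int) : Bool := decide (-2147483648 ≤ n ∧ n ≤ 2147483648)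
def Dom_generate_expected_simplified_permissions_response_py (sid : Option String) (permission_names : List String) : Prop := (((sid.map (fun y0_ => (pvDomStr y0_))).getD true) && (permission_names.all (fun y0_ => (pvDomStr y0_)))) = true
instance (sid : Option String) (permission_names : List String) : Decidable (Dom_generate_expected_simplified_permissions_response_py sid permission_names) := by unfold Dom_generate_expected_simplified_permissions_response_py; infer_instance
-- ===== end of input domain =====

-- B renders a list of section headers (empty when there are no permission names) and
-- joins them with ' ' inside the outer braces, so A's empty-list branch and its two
-- appending loops disappear (objective: simpler; identical output bytes).

-- ===== PORT A =====
def generate_expected_simplified_permissions_response_py (sid : Option String) (permission_names : List String) : String :=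
  let resp := "AccountPermissions {"
  if permission_names.isEmpty then
    resp ++ "}"
  else
    let sidStr := match sid with | none => "None" | some s => s   -- str(sid): None prints as "None"
    let resp := resp ++ "Permissions { Subject: \"" ++ sidStr ++ "\""
    let resp := permission_names.foldl (fun r n => r ++ ("PermissionNames: \"" ++ n ++ "\"")) resp
    let resp := resp ++ "} EffectivePermissions { Subject: \"" ++ sidStr ++ "\""
    let resp := permission_names.foldl (fun r n => r ++ ("PermissionNames: \"" ++ n ++ "\"")) resp
    resp ++ "}}"

-- ===== PORT B =====
def generate_expected_simplified_permissions_response_py_alt (sid : Option String) (permission_names : List String) : String :=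
  let sections : List String := if permission_names.isEmpty then [] else ["Permissions", "EffectivePermissions"]
  let sidStr := match sid with | none => "None" | some s => s   -- str(sid): None prints as "None"
  let render := fun (header : String) =>
    let body := PySem.Str.join "" (permission_names.map (fun n => "PermissionNames: \"" ++ n ++ "\""))
    header ++ " { Subject: \"" ++ sidStr ++ "\"" ++ body ++ "}"
  "AccountPermissions {" ++ PySem.Str.join " " (sections.map render) ++ "}"

-- ===== PRECONDITION & SPEC =====
def Spec_generate_expected_simplified_permissions_response_py (sid : Option String) (permission_names : List String) (out : String) : Prop := out = generate_expected_simplified_permissions_response_py_alt sid permission_names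
instance (sid : Option String) (permission_names : List String) (out : String) : Decidable (Spec_generate_expected_simplified_permissions_response_py sid permission_names out) := by unfold Spec_generate_expected_simplified_permissions_response_py; infer_instance

-- ===== CLAIM (what is proved, stated in full; the proofs are below) =====
def Claim_equal_generate_expected_simplified_permissions_response_py : Prop := ∀ (sid : Option String) (permission_names : List String), Dom_generate_expected_simplified_permissions_response_py sid permission_names → Spec_generate_expected_simplified_permissions_response_py sid permission_names (generate_expected_simplified_permissions_response_py sid permission_names)

-- ===== LEMMAS AND PROOFS =====
theorem foldl_append_join (f : String → String) (l : List String) (acc : String) :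
    l.foldl (fun r n => r ++ f n) acc = acc ++ String.join (l.map f) := by
  induction l generalizing acc with
  | nil => simp [String.join]
  | cons h t ih =>
    simp only [List.foldl_cons, List.map_cons]
    rw [ih, String.append_assoc]
    congr 1
    have hj : String.join (f h :: List.map f t)
        = List.foldl (fun r n => r ++ f n) ("" ++ f h) t := by
      simp only [String.join, List.foldl_cons, List.foldl_map]
    rw [hj, ih]
    simp

theorem join_pair (sep a b : String) :
    PySem.Str.join sep [a, b] = a ++ sep ++ b := by
  simp [PySem.Str.join, PySem.Chars.join, ← String.toList_inj, List.intercalate]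

theorem join_empty_sep (l : List String) : PySem.Str.join "" l = String.join l := by
  have h : ∀ (m : List (List Char)), List.intercalate ([] : List Char) m = m.flatten := by
    intro m; induction m with
    | nil => simp [List.intercalate]
    | cons x t ih =>
      cases t with
      | nil => simp [List.intercalate]
      | cons y s => simp_all [List.intercalate, List.intersperse]
  simp [PySem.Str.join, PySem.Chars.join, ← String.toList_inj, String.toList_join, h]

-- ===== VERDICT (by name: the statement is the Claim_ definition above) =====
theorem generate_expected_simplified_permissions_response_py_spec : Claim_equal_generate_expected_simplified_permissions_response_py := by
  intro sid permission_names _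
  unfold Spec_generate_expected_simplified_permissions_response_py
  unfold generate_expected_simplified_permissions_response_py generate_expected_simplified_permissions_response_py_alt
  by_cases h : permission_names.isEmpty
  · simp [h, PySem.Str.join, PySem.Chars.join, List.intercalate]
  · simp only [h, if_false, Bool.false_eq_true, List.map_cons, List.map_nil]
    rw [join_pair, join_empty_sep,
        foldl_append_join (fun n => "PermissionNames: \"" ++ n ++ "\""),
        foldl_append_join (fun n => "PermissionNames: \"" ++ n ++ "\"")]
    simp [← String.toList_inj]
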